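-- pv_equiv track=rewrite | github.com/flux7200/inf-esoteric-language | main.py | chars_to_instructions
-- ===== SOURCE A (Python) =====
-- def chars_to_instructions(chars):
--     ptr = 1
--     prog = []
--
--     for char in chars:
--         if char == "I":
--             ptr += 1
--
--         elif char == "N":
--             ptr -= 1
--
--         elif char == "F":
--             prog.append(ptr)
--
--     return prog
-- ===== SOURCE B (Python) =====
-- def chars_to_instructions(chars):
--     # Pass 1: compute the running pointer state after each char (prefix scan).
--     states = [1]
--     p = 1
--     for c in chars:
--         p += 1 if c == "I" else -1 if c == "N" else 0
--         states.append(p)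
--     # Pass 2: collect the pointer state at every 'F' position.
--     # 'F' does not change the pointer, so the pre-state states[j] is what A appends.
--     return [v for c, v in zip(chars, states) if c == "F"]
-- ===== Notes on version B (the rewrite author's own statement) =====
-- stated objective: alternative
-- what changed: Replaced A's single fused branching loop by a two-pass scan: first a prefix-sum of per-char deltas yielding all pointer states, then a zip-and-filter pass collecting the state at each 'F'.
import Mathlib
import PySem

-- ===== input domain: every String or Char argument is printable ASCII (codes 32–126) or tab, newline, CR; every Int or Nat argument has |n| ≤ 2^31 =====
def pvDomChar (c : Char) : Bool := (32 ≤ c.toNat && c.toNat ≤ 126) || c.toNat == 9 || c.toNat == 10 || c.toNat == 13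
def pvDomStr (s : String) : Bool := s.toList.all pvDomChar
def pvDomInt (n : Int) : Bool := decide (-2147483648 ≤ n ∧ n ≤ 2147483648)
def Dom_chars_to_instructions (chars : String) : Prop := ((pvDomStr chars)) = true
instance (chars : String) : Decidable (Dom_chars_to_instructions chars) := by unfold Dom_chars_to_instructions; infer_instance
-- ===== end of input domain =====

-- B replaces A's fused branching loop by a two-pass scan (all prefix pointer
-- states first, then zip-and-filter on 'F'); same cost, alternative structure.

-- ===== PORT A =====
-- A: one loop carrying (ptr, prog); 'I' increments, 'N' decrements, 'F' appends ptr.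
def chars_to_instructions (chars : String) : List Int :=
  (chars.toList.foldl (fun (st : Int × List Int) c =>
      if c = 'I' then (st.1 + 1, st.2)
      else if c = 'N' then (st.1 - 1, st.2)
      else if c = 'F' then (st.1, st.2 ++ [st.1])
      else st) (1, [])).2

-- ===== PORT B =====
-- B pass 1: the loop building states = [1, p1, p2, …] (running pointer after each char).
def chars_to_instructions_alt (chars : String) : List Int :=
  let states : List Int :=
    (chars.toList.foldl (fun (st : Int × List Int) c =>
        let p := st.1 + (if c = 'I' then 1 else if c = 'N' then -1 else 0)
        (p, st.2 ++ [p])) (1, [1])).2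
  -- B pass 2: zip chars with their pre-state and keep the state at every 'F'.
  ((chars.toList.zip states).filter (fun q => q.1 = 'F')).map Prod.snd

-- ===== PRECONDITION & SPEC =====
def Spec_chars_to_instructions (chars : String) (out : List Int) : Prop := out = chars_to_instructions_alt chars
instance (chars : String) (out : List Int) : Decidable (Spec_chars_to_instructions chars out) := by unfold Spec_chars_to_instructions; infer_instance

-- ===== CLAIM (what is proved, stated in full; the proofs are below) =====
def Claim_equal_chars_to_instructions : Prop := ∀ (chars : String), Dom_chars_to_instructions chars → Spec_chars_to_instructions chars (chars_to_instructions chars)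

-- ===== LEMMAS AND PROOFS =====

-- reference recursion: the instruction list from pointer p over the remaining chars
def pvSpecRun (p : Int) : List Char → List Int
  | [] => []
  | c :: cs =>
      if c = 'I' then pvSpecRun (p + 1) cs
      else if c = 'N' then pvSpecRun (p - 1) cs
      else if c = 'F' then p :: pvSpecRun p cs
      else pvSpecRun p cs

def pvDelta (c : Char) : Int := if c = 'I' then 1 else if c = 'N' then -1 else 0

-- the tail of the states list produced from pointer p
def pvScan (p : Int) : List Char → List Int
  | [] => []
  | c :: cs => (p + pvDelta c) :: pvScan (p + pvDelta c) cs

theorem pvA_foldl (l : List Char) : ∀ (p : Int) (acc : List Int),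
    (l.foldl (fun (st : Int × List Int) c =>
      if c = 'I' then (st.1 + 1, st.2)
      else if c = 'N' then (st.1 - 1, st.2)
      else if c = 'F' then (st.1, st.2 ++ [st.1])
      else st) (p, acc)).2 = acc ++ pvSpecRun p l := by
  induction l with
  | nil => intro p acc; simp [pvSpecRun]
  | cons c cs ih =>
      intro p acc
      by_cases hI : c = 'I'
      · simp [hI, pvSpecRun, ih]
      · by_cases hN : c = 'N'
        · simp [hN, pvSpecRun, ih]
        · by_cases hF : c = 'F'
          · simp [hF, pvSpecRun, ih]
          · simp [hI, hN, hF, pvSpecRun, ih]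

theorem pvB_foldl (l : List Char) : ∀ (p : Int) (acc : List Int),
    (l.foldl (fun (st : Int × List Int) c =>
        let q := st.1 + (if c = 'I' then 1 else if c = 'N' then -1 else 0)
        (q, st.2 ++ [q])) (p, acc)).2 = acc ++ pvScan p l := by
  induction l with
  | nil => intro p acc; simp [pvScan]
  | cons c cs ih =>
      intro p acc
      simp [pvScan, pvDelta, ih]

theorem pvZip_filter (l : List Char) : ∀ (p : Int),
    ((l.zip (p :: pvScan p l)).filter (fun q => q.1 = 'F')).map Prod.snd
      = pvSpecRun p l := by
  induction l with
  | nil => intro p; simp [pvSpecRun]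
  | cons c cs ih =>
      intro p
      by_cases hI : c = 'I'
      · simp [hI, pvScan, pvSpecRun, pvDelta, ih]
      · by_cases hN : c = 'N'
        · simp [hN, pvScan, pvSpecRun, pvDelta, ih, sub_eq_add_neg]
        · by_cases hF : c = 'F'
          · simp [hF, pvScan, pvSpecRun, pvDelta, ih]
          · simp [hF, pvScan, pvSpecRun, pvDelta, hI, hN, ih]

-- ===== VERDICT (by name: the statement is the Claim_ definition above) =====
theorem chars_to_instructions_spec : Claim_equal_chars_to_instructions := by
  intro chars _
  unfold Spec_chars_to_instructions chars_to_instructions chars_to_instructions_alt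
  rw [pvA_foldl, pvB_foldl]
  simp [pvZip_filter]
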